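-- pv_equiv track=rewrite | github.com/Brariv/Proyecto-Teoria-de-Computation | Laboratorio4.py | expand_regex
-- ===== SOURCE A (Python) =====
-- def expand_regex(regex):
--     result = ""
--     i = 0
--     while i < len(regex):
--         c = regex[i]
--
--         if c == '\\':
--             result += c + regex[i + 1]
--             i += 2
--             continue
--
--         if c == '+':
--             prev = result[-1]
--             if prev == ')':
--                 # Encontrar el grupo que termina antes de +
--                 j = len(result) - 2
--                 balance = 1
--                 while j >= 0:
--                     if result[j] == ')':
--                         balance += 1
--                     elif result[j] == '(':
--                         balance -= 1
--                     if balance == 0: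
--                         break
--                     j -= 1
--                 group = result[j:]
--                 result += '∘' + group + '*'
--             else:
--                 result = result[:-1] + prev + '∘' + prev + '*'
--         elif c == '?':
--             prev = result[-1]
--             if prev == ')':
--                 # Encontrar el grupo que termina antes de ?
--                 j = len(result) - 2
--                 balance = 1
--                 while j >= 0:
--                     if result[j] == ')':
--                         balance += 1
--                     elif result[j] == '(':
--                         balance -= 1
--                     if balance == 0:
--                         break
--                     j -= 1
--                 group = result[j:]
--                 result = result[:j] + '(' + group + '|ε)'
--             else:
--                 result = result[:-1] + '(' + prev + '|ε)'
--         else: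
--             result += c
--         i += 1
--
--     return result
-- ===== SOURCE B (Python) =====
-- def expand_regex(regex):
--     # One pass with an output buffer plus a stack of unmatched '(' positions and
--     # the start index of the last atom: O(1) group lookup instead of A's backward
--     # balance scan over the output.
--     buf = []        # output characters
--     stack = []      # indices of currently-unmatched '(' in buf
--     atom = 0        # start index in buf of the last atom (as the quantifiers see it)
--
--     def push(c):
--         nonlocal atom
--         if c == '(':
--             stack.append(len(buf))
--             atom = len(buf)
--         elif c == ')':
--             atom = stack.pop() if stack else len(buf)
--         else:
--             atom = len(buf)
--         buf.append(c)
--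
--     i = 0
--     n = len(regex)
--     while i < n:
--         c = regex[i]
--         if c == '\\':
--             push('\\')
--             push(regex[i + 1])
--             i += 2
--             continue
--         if c == '+':
--             tail = buf[atom:]
--             for ch in ['∘'] + tail + ['*']:
--                 push(ch)
--         elif c == '?':
--             g = buf[atom:]
--             del buf[atom:]
--             while stack and stack[-1] >= len(buf):
--                 stack.pop()
--             for ch in ['('] + g + list('|ε)'):
--                 push(ch)
--         else:
--             push(c)
--         i += 1
--     return ''.join(buf)
-- ===== Notes on version B (the rewrite author's own statement) =====
-- stated objective: faster
-- what changed: B maintains a stack of unmatched '(' positions and the start index of the last atom while writing the output buffer, so each '+'/'?' finds its group in O(1) instead of A's backward balance scan over the accumulated result.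
import Mathlib
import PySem

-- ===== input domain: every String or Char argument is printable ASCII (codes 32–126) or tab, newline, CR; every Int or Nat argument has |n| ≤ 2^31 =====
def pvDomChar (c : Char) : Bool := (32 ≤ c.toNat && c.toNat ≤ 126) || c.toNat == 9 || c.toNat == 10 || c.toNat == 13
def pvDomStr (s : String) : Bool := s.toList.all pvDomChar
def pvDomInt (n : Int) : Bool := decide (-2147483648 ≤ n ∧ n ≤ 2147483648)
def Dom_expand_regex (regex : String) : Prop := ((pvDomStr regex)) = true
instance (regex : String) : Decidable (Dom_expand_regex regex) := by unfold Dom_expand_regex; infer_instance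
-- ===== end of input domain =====

-- B replaces A's backward balance scan over the output by a stack of open-paren
-- positions maintained while writing, giving O(1) group-start lookup (objective: faster).

-- ===== PORT A =====
-- A's inner `while j >= 0` balance scan; returns the final j (the break position, or -1).
def findJ (res : List Char) (j : Int) (bal : Int) : Int :=
  if h : 0 ≤ j then
    let c := (PySem.List.pyGet? res j).getD ' '
    let bal' := if c = ')' then bal + 1 else if c = '(' then bal - 1 else bal
    if bal' = 0 then j else findJ res (j - 1) bal'
  else j
termination_by (j + 1).toNat
decreasing_by omega

-- A's outer `while i < len(regex)` loop, with `result` as the accumulator.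
def loopA : List Char → List Char → List Char
  | [], res => res
  | c :: rest, res =>
    if c = '\\' then
      match rest with
      | [] => res ++ [c]        -- Python raises IndexError here (regex[i + 1]); excluded by Pre_
      | d :: rest' => loopA rest' (res ++ [c, d])
    else if c = '+' then
      match res.getLast? with
      | none => res             -- Python raises IndexError here (result[-1]); excluded by Pre_
      | some prev =>
        if prev = ')' then
          let j := findJ res ((res.length : Int) - 2) 1
          let group := PySem.List.slice res (some j) none
          loopA rest (res ++ '∘' :: (group ++ ['*']))
        else
          loopA rest (PySem.List.slice res none (some (-1)) ++ [prev, '∘', prev, '*'])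
    else if c = '?' then
      match res.getLast? with
      | none => res             -- Python raises IndexError here (result[-1]); excluded by Pre_
      | some prev =>
        if prev = ')' then
          let j := findJ res ((res.length : Int) - 2) 1
          let group := PySem.List.slice res (some j) none
          loopA rest (PySem.List.slice res none (some j) ++ '(' :: (group ++ ['|', 'ε', ')']))
        else
          loopA rest (PySem.List.slice res none (some (-1)) ++ '(' :: ([prev] ++ ['|', 'ε', ')']))
    else loopA rest (res ++ [c])

def expand_regex (regex : String) : String := String.ofList (loopA regex.toList [])

-- ===== PORT B =====
-- B's state: output buffer, stack of unmatched '(' positions (top first), last atom start.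
structure BState where
  buf : List Char
  stk : List Nat
  atom : Nat
deriving Repr, DecidableEq

def bpush (σ : BState) (c : Char) : BState :=
  if c = '(' then ⟨σ.buf ++ [c], σ.buf.length :: σ.stk, σ.buf.length⟩
  else if c = ')' then
    match σ.stk with
    | p :: s => ⟨σ.buf ++ [c], s, p⟩
    | [] => ⟨σ.buf ++ [c], [], σ.buf.length⟩
  else ⟨σ.buf ++ [c], σ.stk, σ.buf.length⟩

def bpushAll (σ : BState) (cs : List Char) : BState := cs.foldl bpush σ

-- Source B's `while stack and stack[-1] >= len(buf): stack.pop()`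
def popGE (stk : List Nat) (a : Nat) : List Nat :=
  match stk with
  | [] => []
  | p :: s => if a ≤ p then popGE s a else p :: s

def loopB : List Char → BState → List Char
  | [], σ => σ.buf
  | c :: rest, σ =>
    if c = '\\' then
      match rest with
      | [] => σ.buf ++ [c]      -- unreachable under Pre_ (Python raises)
      | d :: rest' => loopB rest' (bpushAll σ [c, d])
    else if c = '+' then
      let tail := σ.buf.drop σ.atom
      loopB rest (bpushAll σ ('∘' :: (tail ++ ['*'])))
    else if c = '?' then
      let g := σ.buf.drop σ.atom
      let σ' : BState := ⟨σ.buf.take σ.atom, popGE σ.stk σ.atom, σ.atom⟩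
      loopB rest (bpushAll σ' ('(' :: (g ++ ['|', 'ε', ')'])))
    else loopB rest (bpush σ c)

def expand_regex_alt (regex : String) : String := String.ofList (loopB regex.toList ⟨[], [], 0⟩)

-- ===== PRECONDITION & SPEC =====
-- Pre_ excludes exactly the inputs where Python A raises IndexError: a leading '+'/'?'
-- (result[-1] on an empty result) and a trailing backslash run of odd length (regex[i + 1]).
def Pre_expand_regex (regex : String) : Prop :=
  (regex.toList.head? ≠ some '+' ∧ regex.toList.head? ≠ some '?') ∧
  (regex.toList.reverse.takeWhile (· = '\\')).length % 2 = 0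
instance (regex : String) : Decidable (Pre_expand_regex regex) := by
  unfold Pre_expand_regex; infer_instance

def pvWitness_expand_regex : String := "(ab)+c?"

def Spec_expand_regex (regex : String) (out : String) : Prop := out = expand_regex_alt regex
instance (regex : String) (out : String) : Decidable (Spec_expand_regex regex out) := by unfold Spec_expand_regex; infer_instance

-- ===== CLAIM (what is proved, stated in full; the proofs are below) =====
def Claim_equal_expand_regex : Prop := ∀ (regex : String), Dom_expand_regex regex → Pre_expand_regex regex → Spec_expand_regex regex (expand_regex regex)

-- ===== LEMMAS AND PROOFS =====

-- the ghost state: B's state is always `mkState` of A's result (the proof's invariant)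
def mkState (r : List Char) : BState := bpushAll ⟨[], [], 0⟩ r

-- first stack entry as A's scan reports it (-1 for an empty stack)
def topIdx (l : List Nat) : Int :=
  match l with
  | p :: _ => (p : Int)
  | [] => -1

theorem mkState_nil : mkState [] = ⟨[], [], 0⟩ := rfl

theorem bpushAll_append (σ : BState) (xs ys : List Char) :
    bpushAll σ (xs ++ ys) = bpushAll (bpushAll σ xs) ys := by
  simp [bpushAll, List.foldl_append]

theorem mkState_append (r cs : List Char) :
    mkState (r ++ cs) = bpushAll (mkState r) cs := by
  simp [mkState, bpushAll_append]

theorem buf_bpush (σ : BState) (c : Char) : (bpush σ c).buf = σ.buf ++ [c] := by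
  unfold bpush
  split_ifs <;> first | rfl | (cases h : σ.stk <;> rfl)

theorem buf_bpushAll (σ : BState) (cs : List Char) :
    (bpushAll σ cs).buf = σ.buf ++ cs := by
  induction cs generalizing σ with
  | nil => simp [bpushAll]
  | cons c cs ih =>
    show (bpushAll (bpush σ c) cs).buf = _
    rw [ih, buf_bpush]
    simp

theorem buf_mkState (r : List Char) : (mkState r).buf = r := by
  simpa using buf_bpushAll ⟨[], [], 0⟩ r

theorem mkState_eta (r : List Char) :
    (⟨r, (mkState r).stk, (mkState r).atom⟩ : BState) = mkState r := by
  conv_rhs => rw [show mkState r = ⟨(mkState r).buf, (mkState r).stk, (mkState r).atom⟩ from rfl]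
  rw [buf_mkState]

-- bpush never reads σ.atom
theorem bpush_atom_irrel (b : List Char) (s : List Nat) (a₁ a₂ : Nat) (c : Char) :
    bpush ⟨b, s, a₁⟩ c = bpush ⟨b, s, a₂⟩ c := by
  unfold bpush
  split_ifs <;> rfl

theorem bpushAll_atom_irrel (b : List Char) (s : List Nat) (a₁ a₂ : Nat)
    (c : Char) (cs : List Char) :
    bpushAll ⟨b, s, a₁⟩ (c :: cs) = bpushAll ⟨b, s, a₂⟩ (c :: cs) := by
  show bpushAll (bpush ⟨b, s, a₁⟩ c) cs = bpushAll (bpush ⟨b, s, a₂⟩ c) cs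
  rw [bpush_atom_irrel b s a₁ a₂ c]

-- stack entries are bounded by the buffer length
theorem stk_bound (r : List Char) : ∀ q ∈ (mkState r).stk, q < r.length := by
  induction r using List.reverseRecOn with
  | nil => simp [mkState_nil]
  | append_singleton r c ih =>
    intro q hq
    rw [mkState_append] at hq
    have hb : (mkState r).buf = r := buf_mkState r
    have hlen : (r ++ [c]).length = r.length + 1 := by simp
    rw [hlen]
    revert hq
    show q ∈ (bpush (mkState r) c).stk → _
    unfold bpush
    split_ifs with h1 h2
    · rw [hb]
      intro hq
      rcases List.mem_cons.mp hq with rfl | h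
      · exact Nat.lt_succ_self _
      · exact Nat.lt_succ_of_lt (ih q h)
    · cases hstk : (mkState r).stk with
      | nil => intro hq; simp at hq
      | cons p s =>
        intro hq
        exact Nat.lt_succ_of_lt (ih q (by rw [hstk]; exact List.mem_cons_of_mem p hq))
    · intro hq
      exact Nat.lt_succ_of_lt (ih q hq)

theorem popGE_of_forall_lt (s : List Nat) (a : Nat) (h : ∀ q ∈ s, q < a) :
    popGE s a = s := by
  cases s with
  | nil => rfl
  | cons p t =>
    unfold popGE
    have : ¬ a ≤ p := by have := h p (by simp); omega
    simp [this]

-- the stack is strictly decreasing from the top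
theorem stk_sorted (r : List Char) : (mkState r).stk.Pairwise (· > ·) := by
  induction r using List.reverseRecOn with
  | nil => simp [mkState_nil]
  | append_singleton r c ih =>
    rw [mkState_append]
    show ((bpush (mkState r) c).stk).Pairwise (· > ·)
    unfold bpush
    split_ifs
    · rw [buf_mkState r]
      exact List.pairwise_cons.mpr ⟨fun y hy => stk_bound r y hy, ih⟩
    · cases hstk : (mkState r).stk with
      | nil => simp
      | cons p s =>
        have := ih
        rw [hstk] at this
        exact (List.pairwise_cons.mp this).2
    · exact ih

-- each stack entry q remembers the stack below it: mkState (take q r) has exactly that stack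
theorem stk_take (r : List Char) : ∀ pre q s, (mkState r).stk = pre ++ q :: s →
    (mkState (r.take q)).stk = s := by
  induction r using List.reverseRecOn with
  | nil => intro pre q s h; rw [mkState_nil] at h; exact absurd h (by simp)
  | append_singleton r c ih =>
    intro pre q s h
    rw [mkState_append] at h
    have hb : (mkState r).buf = r := buf_mkState r
    have hlt := stk_bound r
    revert h
    show (bpush (mkState r) c).stk = pre ++ q :: s → _
    unfold bpush
    split_ifs with h1 h2
    · rw [hb]
      intro h
      cases pre with
      | nil =>
        rw [List.nil_append] at h
        injection h with he hs
        subst he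
        rw [List.take_append_of_le_length (le_refl _), List.take_length]
        exact hs
      | cons x pre' =>
        rw [List.cons_append] at h
        injection h with he htl
        have hq : q ∈ (mkState r).stk := by rw [htl]; simp
        rw [List.take_append_of_le_length (le_of_lt (hlt q hq))]
        exact ih pre' q s htl
    · cases hstk : (mkState r).stk with
      | nil => intro h; exact absurd h (by simp)
      | cons p t =>
        intro h
        have h' : t = pre ++ q :: s := h
        have hqmem : q ∈ (mkState r).stk := by rw [hstk, h']; simp
        rw [List.take_append_of_le_length (le_of_lt (hlt q hqmem))]
        exact ih (p :: pre) q s (by rw [hstk, h']; rfl)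
    · intro h
      have hqmem : q ∈ (mkState r).stk := by rw [h]; simp
      rw [List.take_append_of_le_length (le_of_lt (hlt q hqmem))]
      exact ih pre q s h

-- A's backward balance scan with balance b = the b-th entry of B's stack (top first)
theorem scan_eq_stk (r : List Char) : ∀ (extra : List Char) (b : Nat), 1 ≤ b →
    findJ (r ++ extra) ((r.length : Int) - 1) (b : Int) =
      topIdx ((mkState r).stk.drop (b - 1)) := by
  induction r using List.reverseRecOn with
  | nil =>
    intro extra b hb
    rw [findJ]
    have h : ¬ (0 : Int) ≤ (([] : List Char).length : Int) - 1 := by simp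
    rw [dif_neg h]
    simp [mkState_nil, topIdx]
  | append_singleton r c ih =>
    intro extra b hb
    have hb' : (mkState r).buf = r := buf_mkState r
    have harr : (r ++ [c]) ++ extra = r ++ (c :: extra) := by simp
    have hj : (((r ++ [c]).length : Int)) - 1 = (r.length : Int) := by simp
    have h0 : (0 : Int) ≤ (r.length : Int) := Int.natCast_nonneg _
    have hget : (PySem.List.pyGet? (r ++ (c :: extra)) ((r.length : Int))).getD ' ' = c := by
      rw [PySem.List.pyGet?_natCast]
      simp
    have hstk' : (mkState (r ++ [c])).stk = (bpush (mkState r) c).stk := by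
      rw [mkState_append]; rfl
    rw [harr, hj, findJ, dif_pos h0]
    simp only [hget, hstk']
    by_cases hc1 : c = ')'
    · subst hc1
      simp only [reduceIte]
      have hne : ((b : Int) + 1) ≠ 0 := by omega
      rw [if_neg hne]
      have hcast : ((b : Int) + 1) = ((b + 1 : Nat) : Int) := by push_cast; ring
      rw [hcast, ih (')' :: extra) (b + 1) (by omega)]
      unfold bpush
      simp only [reduceIte]
      cases hstk : (mkState r).stk with
      | nil => simp [topIdx]
      | cons p s =>
        obtain ⟨b', rfl⟩ : ∃ b', b = b' + 1 := ⟨b - 1, by omega⟩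
        simp
    · by_cases hc2 : c = '('
      · subst hc2
        have e1 : (if ('(' : Char) = ')' then (b : Int) + 1
            else if ('(' : Char) = '(' then (b : Int) - 1 else (b : Int)) = (b : Int) - 1 := by
          rw [if_neg (by decide), if_pos rfl]
        rw [e1]
        unfold bpush
        simp only [reduceIte]
        rw [hb']
        by_cases hbe : b = 1
        · subst hbe
          norm_num [topIdx]
        · have hne : ((b : Int) - 1) ≠ 0 := by omega
          rw [if_neg hne]
          have hcast : ((b : Int) - 1) = ((b - 1 : Nat) : Int) := by omega
          rw [hcast, ih ('(' :: extra) (b - 1) (by omega)]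
          obtain ⟨b', rfl⟩ : ∃ b', b = b' + 2 := ⟨b - 2, by omega⟩
          simp
      · rw [if_neg hc1, if_neg hc2]
        rw [if_neg (show (b : Int) ≠ 0 by omega)]
        rw [ih (c :: extra) b hb]
        unfold bpush
        rw [if_neg hc2, if_neg hc1]

-- the atom field of the invariant state, by cases on the last character
theorem atom_mkState (r : List Char) (prev : Char) :
    (mkState (r ++ [prev])).atom =
      (if prev = ')' then
        (match (mkState r).stk with | p :: _ => p | [] => r.length)
       else r.length) := by
  rw [mkState_append]
  show (bpush (mkState r) prev).atom = _
  have hb : (mkState r).buf = r := buf_mkState r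
  unfold bpush
  by_cases hp : prev = ')'
  · have hne : ¬ prev = '(' := by rw [hp]; decide
    rw [if_neg hne, if_pos hp, if_pos hp]
    cases hstk : (mkState r).stk <;> simp [hb]
  · rw [if_neg hp, if_neg hp]
    by_cases hq : prev = '('
    · rw [if_pos hq]
      simp [hb]
    · rw [if_neg hq]
      simp [hb]

-- the main invariant: A's loop with result r = B's loop at state mkState r (r ≠ [])
theorem main_inv : ∀ (n : Nat) (input res : List Char), input.length ≤ n → res ≠ [] →
    loopA input res = loopB input (mkState res) := by
  intro n
  induction n with
  | zero =>
    intro input res hlen _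
    have : input = [] := by cases input <;> simp_all
    subst this
    simp [loopA, loopB, buf_mkState]
  | succ n ih =>
    intro input res hlen hres
    cases input with
    | nil => simp [loopA, loopB, buf_mkState]
    | cons c rest =>
      rw [loopA.eq_def, loopB.eq_def]
      simp only []
      by_cases hc0 : c = '\\'
      · simp only [if_pos hc0]
        cases rest with
        | nil => simp [buf_mkState]
        | cons d rest' =>
          simp only []
          rw [show bpushAll (mkState res) [c, d] = mkState (res ++ [c, d]) from
            (mkState_append res [c, d]).symm]
          exact ih rest' (res ++ [c, d]) (by simp at hlen ⊢; omega) (by simp)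
      · simp only [if_neg hc0]
        obtain ⟨r, prev, rfl⟩ : ∃ r prev, res = r ++ [prev] := by
          rcases List.eq_nil_or_concat res with h | ⟨r, p, h⟩
          · exact absurd h hres
          · exact ⟨r, p, by simpa using h⟩
        have hlast : (r ++ [prev]).getLast? = some prev := by simp
        have hrest : rest.length ≤ n := by simp at hlen; omega
        have hatom := atom_mkState r prev
        have hbuf : (mkState (r ++ [prev])).buf = r ++ [prev] := buf_mkState _
        have hscan := scan_eq_stk r [prev] 1 le_rfl
        simp only [Nat.cast_one, Nat.sub_self, List.drop_zero] at hscan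
        have hlen2 : ((r ++ [prev]).length : Int) - 2 = (r.length : Int) - 1 := by
          simp only [List.length_append, List.length_singleton]
          push_cast
          ring
        have htake : (r ++ [prev]).take r.length = r := by
          rw [List.take_append_of_le_length (le_refl _), List.take_length]
        have hdropl : (r ++ [prev]).drop r.length = [prev] := by simp
        by_cases hc1 : c = '+'
        · simp only [if_pos hc1, hlast]
          by_cases hp : prev = ')'
          · simp only [if_pos hp]
            rw [hlen2, hscan]
            simp only [if_pos hp] at hatom
            cases hstk : (mkState r).stk with
            | nil =>
              rw [hstk] at hatom
              simp only [topIdx]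
              rw [PySem.List.slice_from_neg_one]
              have hL : (r ++ [prev]).length - 1 = r.length := by simp
              rw [hL, hbuf, hatom, hdropl]
              rw [← mkState_append]
              exact ih rest _ hrest (by simp)
            | cons p s =>
              rw [hstk] at hatom
              simp only [topIdx]
              rw [PySem.List.slice_from _ (Int.natCast_nonneg p)]
              simp only [Int.toNat_natCast]
              rw [hbuf, hatom]
              rw [← mkState_append]
              exact ih rest _ hrest (by simp)
          · simp only [if_neg hp]
            rw [PySem.List.slice_to_neg_one]
            have hdl : (r ++ [prev]).dropLast = r := by simp
            rw [hdl]
            simp only [if_neg hp] at hatom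
            rw [hbuf, hatom, hdropl]
            rw [show r ++ [prev, '∘', prev, '*'] = (r ++ [prev]) ++ '∘' :: ([prev] ++ ['*']) from by simp]
            rw [← mkState_append]
            exact ih rest _ hrest (by simp)
        · by_cases hc2 : c = '?'
          · simp only [if_neg hc1, if_pos hc2, hlast]
            by_cases hp : prev = ')'
            · simp only [if_pos hp]
              rw [hlen2, hscan]
              simp only [if_pos hp] at hatom
              cases hstk : (mkState r).stk with
              | nil =>
                rw [hstk] at hatom
                simp only [topIdx]
                rw [PySem.List.slice_to_neg_one, PySem.List.slice_from_neg_one]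
                have hdl : (r ++ [prev]).dropLast = r := by simp
                have hL : (r ++ [prev]).length - 1 = r.length := by simp
                rw [hdl, hL, hbuf, hatom, htake, hdropl]
                have hstk2 : (mkState (r ++ [prev])).stk = [] := by
                  rw [mkState_append]
                  show (bpush (mkState r) prev).stk = []
                  unfold bpush
                  rw [hp, if_neg (by decide), if_pos rfl, hstk]
                rw [hstk2]
                have hpop : popGE ([] : List Nat) r.length = (mkState r).stk := by
                  rw [hstk]; rfl
                rw [hpop]
                rw [bpushAll_atom_irrel r (mkState r).stk r.length (mkState r).atom '('
                  ([prev] ++ ['|', 'ε', ')'])]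
                rw [mkState_eta r]
                rw [← mkState_append]
                exact ih rest _ hrest (by simp)
              | cons p s =>
                rw [hstk] at hatom
                simp only [topIdx]
                have hplt : p < r.length := stk_bound r p (by rw [hstk]; simp)
                rw [PySem.List.slice_to _ (Int.natCast_nonneg p),
                  PySem.List.slice_from _ (Int.natCast_nonneg p)]
                simp only [Int.toNat_natCast]
                rw [hbuf, hatom]
                have hstk2 : (mkState (r ++ [prev])).stk = s := by
                  rw [mkState_append]
                  show (bpush (mkState r) prev).stk = s
                  unfold bpush
                  rw [hp, if_neg (by decide), if_pos rfl, hstk]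
                rw [hstk2]
                have hsorted : ∀ q ∈ s, q < p := by
                  intro q hq
                  have hch := stk_sorted r
                  rw [hstk] at hch
                  exact List.rel_of_pairwise_cons hch hq
                rw [popGE_of_forall_lt s p hsorted]
                have hstake : (mkState ((r ++ [prev]).take p)).stk = s := by
                  rw [List.take_append_of_le_length (le_of_lt hplt)]
                  exact stk_take r [] p s hstk
                rw [bpushAll_atom_irrel ((r ++ [prev]).take p) s p
                  (mkState ((r ++ [prev]).take p)).atom '(' ((r ++ [prev]).drop p ++ ['|', 'ε', ')'])]
                rw [show (⟨(r ++ [prev]).take p, s, (mkState ((r ++ [prev]).take p)).atom⟩ : BState) =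
                    mkState ((r ++ [prev]).take p) from by
                  rw [← hstake]; exact mkState_eta _]
                rw [← mkState_append]
                exact ih rest _ hrest (by simp)
            · simp only [if_neg hp]
              rw [PySem.List.slice_to_neg_one]
              have hdl : (r ++ [prev]).dropLast = r := by simp
              rw [hdl]
              simp only [if_neg hp] at hatom
              rw [hbuf, hatom, htake, hdropl]
              have hpop : popGE (mkState (r ++ [prev])).stk r.length = (mkState r).stk := by
                rw [mkState_append]
                show popGE (bpush (mkState r) prev).stk r.length = _
                unfold bpush
                by_cases hq : prev = '('
                · rw [if_pos hq, buf_mkState r]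
                  show popGE (r.length :: (mkState r).stk) r.length = _
                  have step : popGE (r.length :: (mkState r).stk) r.length =
                      popGE (mkState r).stk r.length := by
                    simp [popGE]
                  rw [step]
                  exact popGE_of_forall_lt _ _ (stk_bound r)
                · rw [if_neg hq, if_neg hp]
                  exact popGE_of_forall_lt _ _ (stk_bound r)
              rw [hpop]
              rw [bpushAll_atom_irrel r (mkState r).stk r.length (mkState r).atom '('
                ([prev] ++ ['|', 'ε', ')'])]
              rw [mkState_eta r]
              rw [← mkState_append]
              rw [show r ++ '(' :: ([prev] ++ ['|', 'ε', ')']) = r ++ ('(' :: ([prev] ++ ['|', 'ε', ')'])) from rfl]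
              exact ih rest _ hrest (by simp)
          · simp only [if_neg hc1, if_neg hc2]
            rw [show bpush (mkState (r ++ [prev])) c = mkState ((r ++ [prev]) ++ [c]) from by
              rw [mkState_append (r ++ [prev]) [c]]
              rfl]
            exact ih rest _ hrest (by simp)

-- ===== VERDICT (by name: the statement is the Claim_ definition above) =====
theorem expand_regex_spec : Claim_equal_expand_regex := by
  intro regex _ hpre
  unfold Spec_expand_regex expand_regex expand_regex_alt
  obtain ⟨⟨h1, h2⟩, _⟩ := hpre
  congr 1
  cases hL : regex.toList with
  | nil => rfl
  | cons c rest =>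
    rw [hL] at h1 h2
    simp only [List.head?] at h1 h2
    rw [loopA.eq_def, loopB.eq_def]
    simp only []
    by_cases hc0 : c = '\\'
    · simp only [if_pos hc0]
      cases rest with
      | nil => rfl
      | cons d rest' =>
        simp only []
        rw [show bpushAll (⟨[], [], 0⟩ : BState) [c, d] = mkState ([c, d]) from rfl]
        exact main_inv rest'.length rest' [c, d] (le_refl _) (by simp)
    · have hc1 : ¬ c = '+' := fun h => h1 (by rw [h])
      have hc2 : ¬ c = '?' := fun h => h2 (by rw [h])
      simp only [if_neg hc0, if_neg hc1, if_neg hc2]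
      rw [show bpush (⟨[], [], 0⟩ : BState) c = mkState [c] from rfl]
      exact main_inv rest.length rest [c] (le_refl _) (by simp)
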